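-- pv_equiv track=rewrite | github.com/m0ai/AlgorithmPractice | HackerRank/pseudo-isomorphic/solve.py | pseudoIsomorphicSubstrings
-- ===== SOURCE A (Python) =====
-- def pseudoIsomorphicSubstrings(s):
--     learned_pattern = list()
--     for cur_index in range(1, len(s)+1):
--         splited_str = s[:cur_index]
--         for read_length in reversed(range(cur_index)):
--             char = splited_str[read_length:cur_index]
--
--             parsed_pattern = list()
--             pattern_match_dict = {}
--             new_char = 0
--             for c in char:
--                 if c not in pattern_match_dict:
--                     pattern_match_dict[c] = new_char
--                     new_char += 1
--                 parsed_pattern.append(pattern_match_dict[c])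
--
--             if parsed_pattern not in learned_pattern:
--                 learned_pattern.append(parsed_pattern)
--
--         yield len(learned_pattern)
-- ===== SOURCE B (Python) =====
-- def pseudoIsomorphicSubstrings(s):
--     # One pass over end positions: keep, for every start index, the incremental
--     # canonical-pattern state, and a set of all distinct patterns seen so far.
--     states = []          # one [char->code map, next_code, pattern] per start index
--     seen = set()
--     for c in s:
--         states.append([{}, 0, []])
--         for st in states:
--             m, nxt, pat = st
--             if c not in m:
--                 m[c] = nxt
--                 st[1] = nxt + 1
--             pat.append(m[c])
--             seen.add(tuple(pat))
--         yield len(seen)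
-- ===== Notes on version B (the rewrite author's own statement) =====
-- stated objective: faster
-- what changed: Instead of recomputing every substring's pattern from scratch for each prefix and deduplicating by a linear scan over a list of patterns, B makes one pass over end positions, maintaining an incremental canonical-pattern state per start index (extend each pattern by one code per new character) and a hash set of all patterns seen, yielding the set's size per prefix.
import Mathlib
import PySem

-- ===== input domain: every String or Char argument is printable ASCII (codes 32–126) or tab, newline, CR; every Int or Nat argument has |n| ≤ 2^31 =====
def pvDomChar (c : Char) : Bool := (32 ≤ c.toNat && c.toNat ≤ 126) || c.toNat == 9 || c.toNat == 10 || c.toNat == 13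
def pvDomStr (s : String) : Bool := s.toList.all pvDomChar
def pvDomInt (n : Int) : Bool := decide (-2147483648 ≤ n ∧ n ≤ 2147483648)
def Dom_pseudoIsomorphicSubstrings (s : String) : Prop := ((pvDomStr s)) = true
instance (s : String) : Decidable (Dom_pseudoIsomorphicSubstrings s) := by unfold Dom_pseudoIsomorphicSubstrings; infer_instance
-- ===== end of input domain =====

-- B replaces A's per-substring pattern recomputation and linear-scan dedup list by one pass over
-- end positions with incremental per-start pattern states and a set of seen patterns (faster).

-- ===== PORT A =====
-- A's innermost loop: canonical pattern of one substring (parsed_pattern / pattern_match_dict / new_char).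
def pvParsePattern (chars : List Char) : List Int :=
  (chars.foldl
    (fun (st : List Int × PySem.Dict Char Int × Int) c =>
      let parsed := st.1
      let d := st.2.1
      let nw := st.2.2
      let (d, nw) := if d.contains c then (d, nw) else (d.insert c nw, nw + 1)
      (parsed ++ [d.getD c 0], d, nw))
    ([], PySem.Dict.empty, 0)).1

def pseudoIsomorphicSubstrings (s : String) : List Int :=
  ((PySem.List.pyRange 1 (PySem.Str.len s + 1) 1).foldl
    (fun (acc : List (List Int) × List Int) cur =>
      let splited := PySem.List.slice s.toList none (some cur)
      let learned := ((PySem.List.pyRange 0 cur 1).reverse).foldl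
        (fun learned rl =>
          let ch := PySem.List.slice splited (some rl) (some cur)
          let p := pvParsePattern ch
          if p ∈ learned then learned else learned ++ [p])
        acc.1
      (learned, acc.2 ++ [(learned.length : Int)]))
    ([], [])).2

-- ===== PORT B =====
-- One per-start state [char->code map, next code, pattern]; extending it by one character.
def pvAltStep (c : Char) (st : PySem.Dict Char Int × Int × List Int) :
    PySem.Dict Char Int × Int × List Int :=
  let m := st.1
  let nxt := st.2.1
  let pat := st.2.2
  let (m, nxt) := if m.contains c then (m, nxt) else (m.insert c nxt, nxt + 1)
  (m, nxt, pat ++ [m.getD c 0])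

def pseudoIsomorphicSubstrings_alt (s : String) : List Int :=
  (s.toList.foldl
    (fun (acc : List (PySem.Dict Char Int × Int × List Int) × PySem.Set (List Int) × List Int) c =>
      let states := acc.1 ++ [(PySem.Dict.empty, 0, [])]
      let res := states.foldl
        (fun (p : List (PySem.Dict Char Int × Int × List Int) × PySem.Set (List Int)) st =>
          (p.1 ++ [pvAltStep c st], PySem.Set.add p.2 (pvAltStep c st).2.2))
        ([], acc.2.1)
      (res.1, res.2, acc.2.2 ++ [(PySem.Set.len res.2 : Int)]))
    ([], PySem.Set.empty, [])).2.2

-- ===== PRECONDITION & SPEC =====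
def Spec_pseudoIsomorphicSubstrings (s : String) (out : List Int) : Prop := out = pseudoIsomorphicSubstrings_alt s
instance (s : String) (out : List Int) : Decidable (Spec_pseudoIsomorphicSubstrings s out) := by unfold Spec_pseudoIsomorphicSubstrings; infer_instance

-- ===== CLAIM (what is proved, stated in full; the proofs are below) =====
def Claim_equal_pseudoIsomorphicSubstrings : Prop := ∀ (s : String), Dom_pseudoIsomorphicSubstrings s → Spec_pseudoIsomorphicSubstrings s (pseudoIsomorphicSubstrings s)

-- ===== LEMMAS AND PROOFS =====

-- Canonical pattern machinery shared by both sides of the proof.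
def pvPatState (cs : List Char) : PySem.Dict Char Int × Int × List Int :=
  cs.foldl (fun st c => pvAltStep c st) (PySem.Dict.empty, 0, [])

def pvPat (cs : List Char) : List Int := (pvPatState cs).2.2

def pvSub (cs : List Char) (i j : ℕ) : List Char := (cs.drop i).take (j - i)

-- Distinct canonical patterns of the substrings of cs ending at index ≤ e.
def pvF (cs : List Char) (e : ℕ) : Finset (List Int) :=
  ((List.range e).flatMap (fun j => (List.range (j+1)).map (fun i => pvPat (pvSub cs i (j+1))))).toFinset

def pvOut (cs : List Char) (e : ℕ) : List Int :=
  (List.range e).map (fun k => ((pvF cs (k+1)).card : Int))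

theorem pvPatState_append (l : List Char) (c : Char) :
    pvPatState (l ++ [c]) = pvAltStep c (pvPatState l) := by
  simp [pvPatState]

-- A's inner loop computes the same state triple as B's incremental step, components permuted.
theorem pvParse_fold (l : List Char) (parsed : List Int) (d : PySem.Dict Char Int) (nw : Int) :
    l.foldl
      (fun (st : List Int × PySem.Dict Char Int × Int) c =>
        let parsed := st.1
        let d := st.2.1
        let nw := st.2.2
        let (d, nw) := if d.contains c then (d, nw) else (d.insert c nw, nw + 1)
        (parsed ++ [d.getD c 0], d, nw))
      (parsed, d, nw)
      = (let r := l.foldl (fun st c => pvAltStep c st) (d, nw, parsed)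
         (r.2.2, r.1, r.2.1)) := by
  induction l generalizing parsed d nw with
  | nil => simp
  | cons c l ih =>
      simp only [List.foldl_cons]
      cases h : d.contains c <;> simp [pvAltStep, h, ih, PySem.Dict.getD_insert_self]

theorem pvParsePattern_eq_pvPat (l : List Char) : pvParsePattern l = pvPat l := by
  have h := pvParse_fold l [] PySem.Dict.empty 0
  simp only [pvParsePattern, pvPat, pvPatState, h]

theorem pvSub_succ (cs : List Char) (i e : ℕ) (hie : i ≤ e) (he : e < cs.length) :
    pvSub cs i (e+1) = pvSub cs i e ++ [cs[e]] := by
  unfold pvSub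
  have h1 : e + 1 - i = (e - i) + 1 := by omega
  rw [h1, ← List.take_concat_get (by simp; omega)]
  simp [List.getElem_drop, Nat.add_sub_cancel' hie]

theorem pvSet_inv_toFinset (cs : List Char) (e : ℕ) :
    ((PySem.Set.empty : PySem.Set (List Int)).update
      ((List.range e).flatMap (fun j => (List.range (j+1)).map (fun i => pvPat (pvSub cs i (j+1)))))).toFinset
      = pvF cs e := by
  ext y
  simp [PySem.Set.mem_update, pvF, PySem.Set.empty]

theorem pvF_succ (cs : List Char) (e : ℕ) :
    pvF cs (e+1) = pvF cs e ∪ ((List.range (e+1)).map (fun i => pvPat (pvSub cs i (e+1)))).toFinset := by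
  unfold pvF
  rw [List.range_succ, List.flatMap_append, List.flatMap_cons, List.flatMap_nil, List.append_nil,
    List.toFinset_append, List.range_succ]
theorem pvB_inv (cs : List Char) (e : ℕ) (he : e ≤ cs.length) :
    ((cs.take e).foldl
      (fun (acc : List (PySem.Dict Char Int × Int × List Int) × PySem.Set (List Int) × List Int) c =>
        let states := acc.1 ++ [(PySem.Dict.empty, 0, [])]
        let res := states.foldl
          (fun (p : List (PySem.Dict Char Int × Int × List Int) × PySem.Set (List Int)) st =>
            (p.1 ++ [pvAltStep c st], PySem.Set.add p.2 (pvAltStep c st).2.2))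
          ([], acc.2.1)
        (res.1, res.2, acc.2.2 ++ [(PySem.Set.len res.2 : Int)]))
      ([], PySem.Set.empty, []))
    = ((List.range e).map (fun i => pvPatState (pvSub cs i e)),
       (PySem.Set.empty : PySem.Set (List Int)).update
         ((List.range e).flatMap (fun j => (List.range (j+1)).map (fun i => pvPat (pvSub cs i (j+1))))),
       pvOut cs e) := by
  induction e with
  | zero => simp [pvOut, PySem.Set.update_nil]
  | succ e ih =>
      have he' : e < cs.length := by omega
      have ihe := ih (by omega)
      rw [← List.take_concat_get he', List.concat_eq_append, List.foldl_append, ihe]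
      simp only [List.foldl_cons, List.foldl_nil]
      -- name the current states list
      set c := cs[e] with hc
      have hstates : ((List.range e).map (fun i => pvPatState (pvSub cs i e))) ++ [(PySem.Dict.empty, 0, [])]
          = (List.range (e+1)).map (fun i => pvPatState (pvSub cs i e)) := by
        rw [List.range_succ, List.map_append]
        simp [pvSub, pvPatState]
      rw [hstates]
      -- split the paired fold
      rw [PySem.List.foldl_prod_mk
            (f := fun acc st => acc ++ [pvAltStep c st])
            (g := fun acc st => PySem.Set.add acc (pvAltStep c st).2.2)]
      rw [PySem.List.foldl_append_singleton_eq_map, List.nil_append, List.map_map]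
      rw [← PySem.Set.update_map_eq_foldl_add _ (fun st => (pvAltStep c st).2.2), List.map_map]
      have hext : ∀ i ∈ List.range (e+1),
          pvAltStep c (pvPatState (pvSub cs i e)) = pvPatState (pvSub cs i (e+1)) := by
        intro i hi
        rw [List.mem_range] at hi
        rw [pvSub_succ cs i e (by omega) he', pvPatState_append, hc]
      have hmap1 : (List.range (e+1)).map ((fun st => pvAltStep c st) ∘ (fun i => pvPatState (pvSub cs i e)))
          = (List.range (e+1)).map (fun i => pvPatState (pvSub cs i (e+1))) :=
        List.map_congr_left (by intro i hi; simpa using hext i hi)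
      have hmap2 : (List.range (e+1)).map ((fun st => (pvAltStep c st).2.2) ∘ (fun i => pvPatState (pvSub cs i e)))
          = (List.range (e+1)).map (fun i => pvPat (pvSub cs i (e+1))) :=
        List.map_congr_left (by intro i hi; simp [Function.comp, hext i hi, pvPat])
      rw [hmap1, hmap2]
      have hflat : (List.range (e+1)).flatMap (fun j => (List.range (j+1)).map (fun i => pvPat (pvSub cs i (j+1))))
          = ((List.range e).flatMap (fun j => (List.range (j+1)).map (fun i => pvPat (pvSub cs i (j+1)))))
            ++ (List.range (e+1)).map (fun i => pvPat (pvSub cs i (e+1))) := by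
        rw [List.range_succ, List.flatMap_append, List.flatMap_cons, List.flatMap_nil, List.append_nil, List.range_succ]
      have h2 : (((PySem.Set.empty : PySem.Set (List Int)).update
          ((List.range e).flatMap (fun j => (List.range (j+1)).map (fun i => pvPat (pvSub cs i (j+1)))))).update
            ((List.range (e+1)).map (fun i => pvPat (pvSub cs i (e+1))))) =
          (PySem.Set.empty : PySem.Set (List Int)).update
            ((List.range (e+1)).flatMap (fun j => (List.range (j+1)).map (fun i => pvPat (pvSub cs i (j+1))))) := by
        rw [hflat, PySem.Set.update_append]
      have hcard : ((PySem.Set.empty : PySem.Set (List Int)).update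
          ((List.range (e+1)).flatMap (fun j => (List.range (j+1)).map (fun i => pvPat (pvSub cs i (j+1)))))).length
          = (pvF cs (e+1)).card := by
        have hnd : (((PySem.Set.empty : PySem.Set (List Int)).update
            ((List.range (e+1)).flatMap (fun j => (List.range (j+1)).map (fun i => pvPat (pvSub cs i (j+1)))))).Nodup) :=
          PySem.Set.nodup_update _ _ (by simp [PySem.Set.empty])
        rw [← List.toFinset_card_of_nodup hnd, pvSet_inv_toFinset]
      simp only [Prod.mk.injEq]
      refine ⟨trivial, h2, ?_⟩
      rw [h2]
      have hout : pvOut cs (e+1) = pvOut cs e ++ [((pvF cs (e+1)).card : Int)] := by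
        simp [pvOut, List.range_succ]
      rw [hout]
      congr 1
      simp only [PySem.Set.len]
      rw [hcard]

-- A-side loop invariant: learned is a duplicate-free list holding exactly the patterns of pvF,
-- and the output so far is pvOut.
theorem pvA_inv (s : String) (e : ℕ) (he : e ≤ s.toList.length) :
    (((PySem.List.pyRange 1 ((e : Int) + 1) 1).foldl
      (fun (acc : List (List Int) × List Int) cur =>
        let splited := PySem.List.slice s.toList none (some cur)
        let learned := ((PySem.List.pyRange 0 cur 1).reverse).foldl
          (fun learned rl =>
            let ch := PySem.List.slice splited (some rl) (some cur)
            let p := pvParsePattern ch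
            if p ∈ learned then learned else learned ++ [p])
          acc.1
        (learned, acc.2 ++ [(learned.length : Int)]))
      ([], [])).1.Nodup) ∧
    (((PySem.List.pyRange 1 ((e : Int) + 1) 1).foldl
      (fun (acc : List (List Int) × List Int) cur =>
        let splited := PySem.List.slice s.toList none (some cur)
        let learned := ((PySem.List.pyRange 0 cur 1).reverse).foldl
          (fun learned rl =>
            let ch := PySem.List.slice splited (some rl) (some cur)
            let p := pvParsePattern ch
            if p ∈ learned then learned else learned ++ [p])
          acc.1
        (learned, acc.2 ++ [(learned.length : Int)]))
      ([], [])).1.toFinset = pvF s.toList e) ∧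
    (((PySem.List.pyRange 1 ((e : Int) + 1) 1).foldl
      (fun (acc : List (List Int) × List Int) cur =>
        let splited := PySem.List.slice s.toList none (some cur)
        let learned := ((PySem.List.pyRange 0 cur 1).reverse).foldl
          (fun learned rl =>
            let ch := PySem.List.slice splited (some rl) (some cur)
            let p := pvParsePattern ch
            if p ∈ learned then learned else learned ++ [p])
          acc.1
        (learned, acc.2 ++ [(learned.length : Int)]))
      ([], [])).2 = pvOut s.toList e) := by
  induction e with
  | zero =>
      rw [show ((0 : ℕ) : Int) + 1 = 1 by norm_num, PySem.List.pyRange_one_eq_nil le_rfl]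
      simp [pvF, pvOut]
  | succ e ih =>
      obtain ⟨h1, h2, h3⟩ := ih (by omega)
      have hr : PySem.List.pyRange 1 (((e+1 : ℕ) : Int) + 1) 1
          = PySem.List.pyRange 1 ((e : Int) + 1) 1 ++ [(e : Int) + 1] := by
        push_cast
        exact PySem.List.pyRange_one_succ_right (by omega)
      rw [hr, List.foldl_append, List.foldl_cons, List.foldl_nil]
      have hsp : PySem.List.slice s.toList none (some ((e : Int) + 1)) = s.toList.take (e+1) := by
        have h := PySem.List.slice_to_natCast s.toList (e+1)
        push_cast at h
        exact h
      have hrange : PySem.List.pyRange 0 ((e : Int) + 1) 1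
          = ((List.range (e+1)).map (fun k : ℕ => (k : Int))) := by
        have h := PySem.List.pyRange_zero_natCast (e+1)
        push_cast at h
        exact h
      have hmapped : ((List.range (e+1)).reverse).map
            ((fun rl : Int => pvParsePattern (PySem.List.slice (s.toList.take (e+1)) (some rl) (some ((e : Int) + 1)))) ∘ (fun k : ℕ => (k : Int)))
          = ((List.range (e+1)).reverse).map (fun k => pvPat (pvSub s.toList k (e+1))) := by
        refine List.map_congr_left ?_
        intro k hk
        rw [List.mem_reverse, List.mem_range] at hk
        have hcast : ((e : Int) + 1) = ((e + 1 : ℕ) : Int) := by push_cast; ring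
        simp only [Function.comp, hcast, PySem.List.slice_natCast, List.drop_take, List.take_take,
          min_self, pvParsePattern_eq_pvPat, pvSub]
      have hinner : ∀ (L : List (List Int)),
          List.foldl (fun learned rl =>
              if pvParsePattern (PySem.List.slice (List.take (e+1) s.toList) (some rl) (some ((e : Int) + 1))) ∈ learned
              then learned
              else learned ++ [pvParsePattern (PySem.List.slice (List.take (e+1) s.toList) (some rl) (some ((e : Int) + 1)))])
            L (((List.range (e+1)).map (fun k : ℕ => (k : Int))).reverse)
          = PySem.Set.update L (((List.range (e+1)).reverse).map (fun k => pvPat (pvSub s.toList k (e+1)))) := by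
        intro L
        rw [← List.map_reverse]
        simp only [← PySem.Set.add_eq_ite]
        rw [← PySem.Set.update_map_eq_foldl_add, List.map_map, hmapped]
      simp only [hsp, hrange]
      rw [hinner]
      have hfin : (PySem.Set.update
          (((PySem.List.pyRange 1 ((e : Int) + 1) 1).foldl
            (fun (acc : List (List Int) × List Int) cur =>
              let splited := PySem.List.slice s.toList none (some cur)
              let learned := ((PySem.List.pyRange 0 cur 1).reverse).foldl
                (fun learned rl =>
                  let ch := PySem.List.slice splited (some rl) (some cur)
                  let p := pvParsePattern ch
                  if p ∈ learned then learned else learned ++ [p])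
                acc.1
              (learned, acc.2 ++ [(learned.length : Int)]))
            ([], [])).1)
          (((List.range (e+1)).reverse).map (fun k => pvPat (pvSub s.toList k (e+1))))).toFinset
          = pvF s.toList (e+1) := by
        rw [pvF_succ, ← h2]
        ext y
        simp [PySem.Set.mem_update, List.mem_reverse]
      refine ⟨PySem.Set.nodup_update _ _ h1, hfin, ?_⟩
      rw [h3]
      have hout : pvOut s.toList (e+1) = pvOut s.toList e ++ [((pvF s.toList (e+1)).card : Int)] := by
        simp [pvOut, List.range_succ]
      rw [hout]
      congr 1
      rw [← List.toFinset_card_of_nodup (PySem.Set.nodup_update _ _ h1), hfin]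

-- ===== VERDICT (by name: the statement is the Claim_ definition above) =====
theorem pseudoIsomorphicSubstrings_spec : Claim_equal_pseudoIsomorphicSubstrings := by
  intro s _
  unfold Spec_pseudoIsomorphicSubstrings
  have hA := (pvA_inv s s.toList.length le_rfl).2.2
  have hB := pvB_inv s.toList s.toList.length le_rfl
  rw [List.take_length] at hB
  unfold pseudoIsomorphicSubstrings pseudoIsomorphicSubstrings_alt
  rw [PySem.Str.len_eq, hA, hB]
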